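-- pv_equiv track=rewrite | github.com/gaushwravetu/Coding-Problems | uber_hacktag/2ndd.py | prefixString
-- ===== SOURCE A (Python) =====
-- from collections import defaultdict
--
-- def prefixString(a,b):
--     mystrdict = defaultdict(int)
--     n = len(a)
--     prefix = ""
--     for i in range(n):
--         for j in range(i,n):
--             prefix = a[i]+a[j]
--             mystrdict[prefix]+=1
--     for j in b:
--         if mystrdict[j]==1:
--             return True
--     return False
--
-- a = ['one','twothree','four']
--
-- b = ['onetwo','one']
-- ===== SOURCE B (Python) =====
-- def prefixString(a, b):
--     # One pass over `a` per query string: count index-ordered pairs (i<=j) with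
--     # a[i]+a[j] == s using a running multiset of the strings seen so far.
--     for s in b:
--         total = 0
--         seen = {}
--         for x in a:
--             seen[x] = seen.get(x, 0) + 1
--             k = len(s) - len(x)
--             if k >= 0 and s.endswith(x):
--                 total += seen.get(s[:k], 0)
--         if total == 1:
--             return True
--     return False
-- ===== Notes on version B (the rewrite author's own statement) =====
-- stated objective: faster
-- what changed: Instead of materializing all n(n+1)/2 concatenations a[i]+a[j] in a dict and then looking queries up, B makes one pass over `a` per query string s, keeping a running multiset of the strings seen so far and adding, for each a[j] that is a suffix of s, the number of earlier-or-equal indices i with a[i] equal to the matching prefix s[:len(s)-len(a[j])].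
import Mathlib
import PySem

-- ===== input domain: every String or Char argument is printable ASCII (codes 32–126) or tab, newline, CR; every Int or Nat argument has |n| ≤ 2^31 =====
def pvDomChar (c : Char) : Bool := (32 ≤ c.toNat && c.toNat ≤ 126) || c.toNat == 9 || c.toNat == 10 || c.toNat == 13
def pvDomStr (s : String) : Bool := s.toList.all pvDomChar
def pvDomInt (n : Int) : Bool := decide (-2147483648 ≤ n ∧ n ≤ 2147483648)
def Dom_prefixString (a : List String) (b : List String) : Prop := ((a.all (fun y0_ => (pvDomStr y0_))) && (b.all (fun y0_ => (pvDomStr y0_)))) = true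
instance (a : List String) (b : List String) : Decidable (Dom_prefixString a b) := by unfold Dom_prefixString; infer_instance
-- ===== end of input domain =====

-- B replaces A's enumeration of all index-ordered pairs a[i]+a[j] by a single pass over `a`
-- per query string, counting split-point matches against a running multiset of seen strings.

-- ===== PORT A =====
-- Python str concatenation, exact: code-point list append
def pyCat (s t : String) : String := String.ofList (s.toList ++ t.toList)

-- the final 'for j in b: if mystrdict[j]==1: return True' loop; the defaultdict read is
-- modeled as getD 0 (the insertion of the default 0 is unobservable for later reads)
def checkA (d : PySem.Dict String Int) : List String → Bool
  | [] => false
  | j :: rest => if d.getD j 0 == 1 then true else checkA d rest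

def prefixString (a : List String) (b : List String) : Bool :=
  let n : Int := (a.length : Int)
  let d : PySem.Dict String Int :=
    (PySem.List.pyRange 0 n 1).foldl (fun d i =>
      (PySem.List.pyRange i n 1).foldl (fun d j =>
        let pre := pyCat (PySem.List.pyGetD a i "") (PySem.List.pyGetD a j "")
        d.insert pre (d.getD pre 0 + 1)) d)
      PySem.Dict.empty
  checkA d b

-- ===== PORT B =====
-- loop body of B's single pass over `a` for query s: update the multiset `seen`, then
-- add the number of i ≤ j with a[i] = s[:k] whenever a[j] is a suffix of s (k = len(s)-len(a[j]))
def stepB (s : String) (st : Int × PySem.Dict String Int) (x : String) :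
    Int × PySem.Dict String Int :=
  let seen := st.2.insert x (st.2.getD x 0 + 1)
  let k : Int := PySem.Str.len s - PySem.Str.len x
  let total :=
    if decide (0 ≤ k) && PySem.Str.endswith s x then
      st.1 + seen.getD (PySem.Str.slice s none (some k)) 0
    else st.1
  (total, seen)

def altCount (s : String) (a : List String) : Int :=
  (a.foldl (stepB s) (0, PySem.Dict.empty)).1

def prefixString_alt (a : List String) (b : List String) : Bool :=
  match b with
  | [] => false
  | s :: rest => if altCount s a == 1 then true else prefixString_alt a rest

-- ===== PRECONDITION & SPEC =====
def Spec_prefixString (a : List String) (b : List String) (out : Bool) : Prop := out = prefixString_alt a b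
instance (a : List String) (b : List String) (out : Bool) : Decidable (Spec_prefixString a b out) := by unfold Spec_prefixString; infer_instance

-- ===== CLAIM (what is proved, stated in full; the proofs are below) =====
def Claim_equal_prefixString : Prop := ∀ (a : List String) (b : List String), Dom_prefixString a b → Spec_prefixString a b (prefixString a b)

-- ===== LEMMAS AND PROOFS =====

-- the list of strings a[i]+a[j], i ≤ j, in A's enumeration order
def ppairs : List String → List String
  | [] => []
  | x :: r => (x :: r).map (fun y => pyCat x y) ++ ppairs r

-- B's suffix test and the matching prefix, the named pieces of stepB
def condB (s y : String) : Bool :=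
  decide (0 ≤ PySem.Str.len s - PySem.Str.len y) && PySem.Str.endswith s y

def preB (s y : String) : String :=
  PySem.Str.slice s none (some (PySem.Str.len s - PySem.Str.len y))

lemma stepB_eq (s : String) (st : Int × PySem.Dict String Int) (x : String) :
    stepB s st x =
      (st.1 + (if condB s x then (st.2.insert x (st.2.getD x 0 + 1)).getD (preB s x) 0 else 0),
       st.2.insert x (st.2.getD x 0 + 1)) := by
  unfold stepB condB preB
  split <;> simp_all

lemma toList_pyCat (s t : String) : (pyCat s t).toList = s.toList ++ t.toList := by
  simp [pyCat]

lemma str_eq_iff (s t : String) : s = t ↔ s.toList = t.toList := by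
  constructor
  · intro h; rw [h]
  · intro h
    have h2 := congrArg String.ofList h
    simpa using h2

lemma endswith_toList (s p : String) : PySem.Str.endswith s p = true ↔ p.toList <:+ s.toList := by
  simp [PySem.Chars.endswith_iff]

lemma slice_take (s : String) (k : Int) (h : 0 ≤ k) :
    (PySem.Str.slice s none (some k)).toList = s.toList.take k.toNat := by
  simp [PySem.List.slice_to _ h]

-- list-level characterization of "x is the k-prefix and y the matching suffix of s"
lemma concat_chars_iff (X Y S : List Char) :
    (Y.length ≤ S.length ∧ Y <:+ S ∧ S.take (S.length - Y.length) = X) ↔ X ++ Y = S := by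
  constructor
  · rintro ⟨hl, ⟨W, rfl⟩, ht⟩
    have hW : (W ++ Y).length - Y.length = W.length := by simp
    rw [hW] at ht
    rw [List.take_left] at ht
    rw [ht]
  · rintro rfl
    refine ⟨by simp, ⟨X, rfl⟩, ?_⟩
    have h : (X ++ Y).length - Y.length = X.length := by simp
    rw [h, List.take_left]

-- the key pointwise fact: B's split test at y recognizes exactly the pairs with x ++ y = s
lemma key_iff (s x y : String) : (condB s y && (preB s y == x)) = (pyCat x y == s) := by
  rw [Bool.eq_iff_iff]
  unfold condB preB
  simp only [Bool.and_eq_true, decide_eq_true_eq, beq_iff_eq, PySem.Str.len_eq]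
  constructor
  · rintro ⟨⟨hk, hend⟩, hpre⟩
    rw [str_eq_iff, toList_pyCat]
    refine (concat_chars_iff _ _ _).mp ⟨by omega, (endswith_toList s y).mp hend, ?_⟩
    have h3 := congrArg String.toList hpre
    rw [slice_take s _ (by omega)] at h3
    rw [show (((s.toList.length : Int)) - ((y.toList.length : Int))).toNat
          = s.toList.length - y.toList.length from by omega] at h3
    exact h3
  · intro h
    have hl : x.toList ++ y.toList = s.toList := by
      have h2 := congrArg String.toList h
      rwa [toList_pyCat] at h2
    obtain ⟨h1, h2, h3⟩ := (concat_chars_iff _ _ _).mpr hl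
    refine ⟨⟨by omega, (endswith_toList s y).mpr h2⟩, ?_⟩
    rw [str_eq_iff, slice_take s _ (by omega)]
    rw [show (((s.toList.length : Int)) - ((y.toList.length : Int))).toNat
          = s.toList.length - y.toList.length from by omega]
    exact h3

-- A's inner loop over j computes the same dict steps as folding over the listed keys
lemma foldl_key (f : Int → String) (l : List Int) (d : PySem.Dict String Int) :
    l.foldl (fun d j => d.insert (f j) (d.getD (f j) 0 + 1)) d
      = (l.map f).foldl (fun d x => d.insert x (d.getD x 0 + 1)) d := by
  induction l generalizing d with
  | nil => rfl
  | cons j l ih => simp only [List.foldl_cons, List.map_cons]; exact ih _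

lemma getD_double (outer : List Int) (g : Int → List String)
    (d : PySem.Dict String Int) (s : String) :
    (outer.foldl (fun d i => (g i).foldl (fun d x => d.insert x (d.getD x 0 + 1)) d) d).getD s 0
      = d.getD s 0 + ((outer.flatMap g).count s : Int) := by
  induction outer generalizing d with
  | nil => simp
  | cons i r ih =>
    simp only [List.foldl_cons, List.flatMap_cons, List.count_append]
    rw [ih, PySem.Dict.getD_foldl_insert_add_one]
    push_cast; ring

lemma range_flat (a : List String) :
    (List.range a.length).flatMap (fun i => (a.drop i).map (fun y => pyCat (a.getD i "") y))
      = ppairs a := by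
  induction a with
  | nil => simp [ppairs]
  | cons x r ih =>
    rw [List.length_cons, List.range_succ_eq_map, List.flatMap_cons, List.flatMap_map]
    simp only [Nat.succ_eq_add_one, List.drop_succ_cons, List.getD_cons_succ,
      List.drop_zero, List.getD_cons_zero]
    rw [ih]
    simp [ppairs]

lemma flat_eq_ppairs (a : List String) :
    (PySem.List.pyRange 0 (a.length : Int) 1).flatMap
        (fun i => (PySem.List.pyRange i (a.length : Int) 1).map
          (fun j => pyCat (PySem.List.pyGetD a i "") (PySem.List.pyGetD a j ""))) = ppairs a := by
  rw [PySem.List.pyRange_zero_nat, List.flatMap_map]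
  have hin : ∀ i : Nat,
      (PySem.List.pyRange (i : Int) (a.length : Int) 1).map
        (fun j => pyCat (PySem.List.pyGetD a (i : Int) "") (PySem.List.pyGetD a j ""))
      = (a.drop i).map (fun y => pyCat (a.getD i "") y) := by
    intro i
    have h1 : (PySem.List.pyRange (i : Int) ((a.length : Nat) : Int) 1).map
        (fun j => PySem.List.pyGetD a j "") = a.drop ((i : Int)).toNat :=
      PySem.List.map_pyGetD_pyRange' a "" (Int.natCast_nonneg i)
    have h2 := congrArg (List.map (fun y => pyCat (PySem.List.pyGetD a (i : Int) "") y)) h1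
    rw [List.map_map] at h2
    simpa [Function.comp] using h2
  simp only [hin]
  exact range_flat a

-- count of matches of s in B's per-element accounting, shifted by a processed prefix t
def SB (s : String) (t : List String) : List String → Int
  | [] => 0
  | y :: r => (if condB s y then (((t ++ [y]).count (preB s y) : Nat) : Int) else 0) + SB s (t ++ [y]) r

-- the cross contribution of the already-processed prefix t
def CB (s : String) (t : List String) : List String → Int
  | [] => 0
  | y :: r => (if condB s y then ((t.count (preB s y) : Nat) : Int) else 0) + CB s t r

lemma counter_snoc (t : List String) (y : String) :
    (PySem.Dict.counter t).insert y ((PySem.Dict.counter t).getD y 0 + 1)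
      = PySem.Dict.counter (t ++ [y]) := by
  conv_rhs => rw [← PySem.Dict.foldl_insert_getD_add_one_eq_counter]
  rw [List.foldl_append, PySem.Dict.foldl_insert_getD_add_one_eq_counter]
  rfl

lemma Bfold (s : String) (r : List String) :
    ∀ (t : List String) (tot : Int),
      r.foldl (stepB s) (tot, PySem.Dict.counter t)
        = (tot + SB s t r, PySem.Dict.counter (t ++ r)) := by
  induction r with
  | nil => intro t tot; simp [SB]
  | cons y r ih =>
    intro t tot
    rw [List.foldl_cons, stepB_eq, counter_snoc, ih]
    simp [SB, PySem.Dict.getD_counter, add_assoc, List.append_assoc]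

lemma CB_nil (s : String) (a : List String) : CB s [] a = 0 := by
  induction a with
  | nil => rfl
  | cons y r ih => simp [CB, ih]

lemma CB_append_singleton (s x : String) (t : List String) (r : List String) :
    CB s (t ++ [x]) r = CB s t r + (r.countP (fun y => condB s y && (preB s y == x)) : Int) := by
  induction r with
  | nil => simp [CB]
  | cons y r ih =>
    have hxp : (x = preB s y) ↔ (preB s y == x) = true := by
      rw [beq_iff_eq]; exact eq_comm
    simp only [CB, List.countP_cons, ih, List.count_append, List.count_cons, List.count_nil]
    by_cases hc : condB s y = true <;> by_cases hp : (preB s y == x) = true <;>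
      simp [hc, hp, hxp] <;> omega

lemma SB_eq (s : String) (a : List String) :
    ∀ t, SB s t a = (((ppairs a).count s : Nat) : Int) + CB s t a := by
  induction a with
  | nil => intro t; simp [SB, CB, ppairs]
  | cons x r ih =>
    intro t
    have hfun : (fun y => condB s y && (preB s y == x)) = (fun y => pyCat x y == s) :=
      funext (fun y => key_iff s x y)
    have hmap : ((List.map (fun y => pyCat x y) (x :: r)).count s)
        = (x :: r).countP (fun y => pyCat x y == s) := by
      rw [List.count_eq_countP, List.countP_map]; rfl
    have hx := key_iff s x x
    have hxp : (x = preB s x) ↔ (preB s x == x) = true := by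
      rw [beq_iff_eq]; exact eq_comm
    simp only [SB, CB]
    rw [ih (t ++ [x]), CB_append_singleton]
    have hpp : ((ppairs (x :: r)).count s)
        = ((x :: r).map (fun y => pyCat x y)).count s + (ppairs r).count s := by
      rw [show ppairs (x :: r) = (x :: r).map (fun y => pyCat x y) ++ ppairs r from rfl,
        List.count_append]
    rw [hpp, hmap, List.countP_cons, ← hx, hfun]
    by_cases hc : condB s x = true <;> by_cases hp : (preB s x == x) = true <;>
      simp [hc, hp, hxp, List.count_append, List.count_cons, List.count_nil] <;> omega

lemma altCount_eq (s : String) (a : List String) :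
    altCount s a = (((ppairs a).count s : Nat) : Int) := by
  unfold altCount
  rw [show (PySem.Dict.empty : PySem.Dict String Int) = PySem.Dict.counter [] from rfl]
  rw [Bfold]
  simp [SB_eq, CB_nil]

lemma check_eq (a : List String) (d : PySem.Dict String Int)
    (h : ∀ s, d.getD s 0 = altCount s a) :
    ∀ b, checkA d b = prefixString_alt a b := by
  intro b
  induction b with
  | nil => rfl
  | cons s r ih => simp only [checkA, prefixString_alt, h s, ih]

-- ===== VERDICT (by name: the statement is the Claim_ definition above) =====
theorem prefixString_spec : Claim_equal_prefixString := by
  intro a b _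
  show prefixString a b = prefixString_alt a b
  simp only [prefixString]
  refine check_eq a _ (fun s => ?_) b
  rw [altCount_eq]
  have hfold :
      (fun (d : PySem.Dict String Int) (i : Int) =>
        (PySem.List.pyRange i (a.length : Int) 1).foldl (fun d j =>
          d.insert (pyCat (PySem.List.pyGetD a i "") (PySem.List.pyGetD a j ""))
            (d.getD (pyCat (PySem.List.pyGetD a i "") (PySem.List.pyGetD a j "")) 0 + 1)) d)
      = (fun (d : PySem.Dict String Int) (i : Int) =>
        ((PySem.List.pyRange i (a.length : Int) 1).map
          (fun j => pyCat (PySem.List.pyGetD a i "") (PySem.List.pyGetD a j ""))).foldl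
            (fun d x => d.insert x (d.getD x 0 + 1)) d) := by
    funext d i
    exact foldl_key _ _ _
  rw [hfold, getD_double ((PySem.List.pyRange 0 (a.length : Int) 1))
        (fun i => (PySem.List.pyRange i (a.length : Int) 1).map
          (fun j => pyCat (PySem.List.pyGetD a i "") (PySem.List.pyGetD a j ""))),
      flat_eq_ppairs]
  simp
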